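-- pv_equiv track=rewrite | github.com/juanesgl/AYED-2024-2 | TERCIO-1/LABORATORIO2/ecologicalbp.py | movement_calculaction
-- ===== SOURCE A (Python) =====
-- def movement_calculaction(bins, colors):
--     total_movements = 0
--
--     # Mapear colores a índices
--     color_index = {'B': 0, 'G': 1, 'C': 2}
--
--     # Asignar cada contenedor al color correspondiente
--     for i in range(3):
--         target_color = color_index[colors[i]]
--         # Mover botellas que no corresponden al color deseado
--         for j in range(3):
--             if j != target_color:
--                 total_movements += bins[i][j]
--
--     return total_movements
-- ===== SOURCE B (Python) =====
-- def movement_calculaction(bins, colors):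
--     color_index = {'B': 0, 'G': 1, 'C': 2}
--     total = sum(bins[i][j] for i in range(3) for j in range(3))
--     matched = sum(bins[i][color_index[colors[i]]] for i in range(3))
--     return total - matched
-- ===== Notes on version B (the rewrite author's own statement) =====
-- stated objective: alternative
-- what changed: B computes the grand total of all nine entries and subtracts the per-bin matching-color entries, instead of A's nested loop that conditionally skips the target column.
-- outside the precondition, e.g. on movement_calculaction([[1, 2], [1, 2], [1, 2]], ['C', 'C', 'C']): A returns 9, B raises IndexError
import Mathlib
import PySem

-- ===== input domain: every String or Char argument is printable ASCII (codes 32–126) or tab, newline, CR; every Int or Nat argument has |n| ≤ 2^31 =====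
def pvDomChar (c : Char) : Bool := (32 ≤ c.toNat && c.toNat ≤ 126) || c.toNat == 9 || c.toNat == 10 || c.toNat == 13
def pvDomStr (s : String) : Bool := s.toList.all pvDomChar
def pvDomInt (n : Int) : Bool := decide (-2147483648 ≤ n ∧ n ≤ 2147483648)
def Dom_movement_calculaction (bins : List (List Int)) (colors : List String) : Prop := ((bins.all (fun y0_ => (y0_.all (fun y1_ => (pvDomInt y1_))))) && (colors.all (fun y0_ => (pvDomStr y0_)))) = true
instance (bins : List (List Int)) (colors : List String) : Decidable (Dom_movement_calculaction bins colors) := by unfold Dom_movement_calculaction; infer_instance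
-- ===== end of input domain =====

-- B computes total-of-all-entries minus the matching-color entries instead of A's
-- nested loop that conditionally skips the target column (objective: alternative).

-- ===== PORT A =====
-- the dict literal color_index = {'B': 0, 'G': 1, 'C': 2}
def pvColorIndex : PySem.Dict String Int := PySem.Dict.ofList [("B", 0), ("G", 1), ("C", 2)]

def movement_calculaction (bins : List (List Int)) (colors : List String) : Int :=
  (PySem.List.pyRange 0 3 1).foldl (fun total_movements i =>
    -- target_color = color_index[colors[i]]  (KeyError/IndexError excluded by Pre_)
    let target_color := (pvColorIndex.get? ((PySem.List.pyGet? colors i).getD "")).getD (-1)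
    (PySem.List.pyRange 0 3 1).foldl (fun acc j =>
      if j ≠ target_color then
        acc + ((PySem.List.pyGet? ((PySem.List.pyGet? bins i).getD []) j).getD 0)
      else acc) total_movements) 0

-- ===== PORT B =====
def pvColorIndexAlt : PySem.Dict String Int := PySem.Dict.ofList [("B", 0), ("G", 1), ("C", 2)]

def movement_calculaction_alt (bins : List (List Int)) (colors : List String) : Int :=
  let total := (PySem.List.pyRange 0 3 1).foldl (fun s i =>
    (PySem.List.pyRange 0 3 1).foldl (fun s2 j =>
      s2 + ((PySem.List.pyGet? ((PySem.List.pyGet? bins i).getD []) j).getD 0)) s) 0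
  let matched := (PySem.List.pyRange 0 3 1).foldl (fun s i =>
    s + ((PySem.List.pyGet? ((PySem.List.pyGet? bins i).getD [])
          ((pvColorIndexAlt.get? ((PySem.List.pyGet? colors i).getD "")).getD (-1))).getD 0)) 0
  total - matched

-- ===== PRECONDITION & SPEC =====
-- Pre_ excludes inputs where A would raise (fewer than 3 bins/colors, an invalid color
-- letter) and, in addition, bins whose first three rows are shorter than 3: there A can
-- still return (it skips the target column) but B's grand total itself raises IndexError.
def Pre_movement_calculaction (bins : List (List Int)) (colors : List String) : Prop :=
  3 ≤ bins.length ∧ 3 ≤ colors.length ∧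
  (∀ r ∈ bins.take 3, 3 ≤ r.length) ∧
  (∀ c ∈ colors.take 3, c = "B" ∨ c = "G" ∨ c = "C")
instance (bins : List (List Int)) (colors : List String) : Decidable (Pre_movement_calculaction bins colors) := by unfold Pre_movement_calculaction; infer_instance

def pvWitness_movement_calculaction : List (List Int) × List String :=
  ([[1, 2, 3], [4, 5, 6], [7, 8, 9]], ["B", "G", "C"])

def Spec_movement_calculaction (bins : List (List Int)) (colors : List String) (out : Int) : Prop := out = movement_calculaction_alt bins colors
instance (bins : List (List Int)) (colors : List String) (out : Int) : Decidable (Spec_movement_calculaction bins colors out) := by unfold Spec_movement_calculaction; infer_instance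

-- ===== CLAIM (what is proved, stated in full; the proofs are below) =====
def Claim_equal_movement_calculaction : Prop := ∀ (bins : List (List Int)) (colors : List String), Dom_movement_calculaction bins colors → Pre_movement_calculaction bins colors → Spec_movement_calculaction bins colors (movement_calculaction bins colors)

-- ===== LEMMAS AND PROOFS =====

theorem pvGet3_0 {α : Type} (x y z : α) (r : List α) :
    PySem.List.pyGet? (x :: y :: z :: r) 0 = some x := by
  simp [PySem.List.pyGet?, PySem.List.pyIdx?]
  rw [if_pos (by omega)]; simp

theorem pvGet3_1 {α : Type} (x y z : α) (r : List α) :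
    PySem.List.pyGet? (x :: y :: z :: r) 1 = some y := by
  simp [PySem.List.pyGet?, PySem.List.pyIdx?]
  rw [if_pos (by omega)]; simp

theorem pvGet3_2 {α : Type} (x y z : α) (r : List α) :
    PySem.List.pyGet? (x :: y :: z :: r) 2 = some z := by
  simp [PySem.List.pyGet?, PySem.List.pyIdx?]
  rw [if_pos (by omega)]; simp

theorem pvCI_B : pvColorIndex.get? "B" = some 0 := by decide
theorem pvCI_G : pvColorIndex.get? "G" = some 1 := by decide
theorem pvCI_C : pvColorIndex.get? "C" = some 2 := by decide
theorem pvCIA_B : pvColorIndexAlt.get? "B" = some 0 := by decide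
theorem pvCIA_G : pvColorIndexAlt.get? "G" = some 1 := by decide
theorem pvCIA_C : pvColorIndexAlt.get? "C" = some 2 := by decide

-- ===== VERDICT (by name: the statement is the Claim_ definition above) =====
set_option maxHeartbeats 4000000 in
theorem movement_calculaction_spec : Claim_equal_movement_calculaction := by
  intro bins colors _ hpre
  obtain ⟨hb, hc, hrow, hcol⟩ := hpre
  match bins, colors with
  | b0 :: b1 :: b2 :: brest, c0 :: c1 :: c2 :: crest =>
    have h0 := hrow b0 (by simp)
    have h1 := hrow b1 (by simp)
    have h2 := hrow b2 (by simp)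
    rcases b0 with _|⟨x0,_|⟨y0,_|⟨z0,r0⟩⟩⟩ <;> simp at h0 <;>
    rcases b1 with _|⟨x1,_|⟨y1,_|⟨z1,r1⟩⟩⟩ <;> simp at h1 <;>
    rcases b2 with _|⟨x2,_|⟨y2,_|⟨z2,r2⟩⟩⟩ <;> simp at h2
    have hc0 := hcol c0 (by simp)
    have hc1 := hcol c1 (by simp)
    have hc2 := hcol c2 (by simp)
    have hr : PySem.List.pyRange 0 3 1 = [0, 1, 2] := by decide
    rcases hc0 with rfl|rfl|rfl <;> rcases hc1 with rfl|rfl|rfl <;> rcases hc2 with rfl|rfl|rfl <;>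
      simp [Spec_movement_calculaction, movement_calculaction, movement_calculaction_alt,
        hr, List.foldl, pvGet3_0, pvGet3_1, pvGet3_2,
        pvCI_B, pvCI_G, pvCI_C, pvCIA_B, pvCIA_G, pvCIA_C] <;> ring
  | [], _ => simp at hb
  | [_], _ => simp at hb
  | [_, _], _ => simp at hb
  | _ :: _ :: _ :: _, [] => simp at hc
  | _ :: _ :: _ :: _, [_] => simp at hc
  | _ :: _ :: _ :: _, [_, _] => simp at hc
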